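-- pv_equiv track=rewrite | github.com/BogdanovYackov/project2 | lib.py | cellsBetween
-- ===== SOURCE A (Python) =====
-- def xy(pos1, pos2):
--     x1 = pos1 % 8
--     x2 = pos2 % 8
--     y1 = pos1 // 8
--     y2 = pos2 // 8
--     return x1, y1, x2, y2
--
-- def sign(a):
--     return -1 if (a < 0) else (1 if a else 0)
--
-- def cellsBetween(pos1, pos2):
--     x1, y1, x2, y2 = xy(pos1, pos2)
--     dx = sign(x2 - x1)
--     dy = sign(y2 - y1)
--     if dx * (y2 - y1) != dy * (x2 - x1):
--         return []
--     n = max(dx * (x2 - x1), dy * (y2 - y1))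
--     dp = dx + dy * 8
--     return [(pos1 + i * dp) for i in range(1, n)]
-- ===== SOURCE B (Python) =====
-- def cellsBetween(pos1, pos2):
--     x1, y1 = pos1 % 8, pos1 // 8
--     x2, y2 = pos2 % 8, pos2 // 8
--     dx = (x1 < x2) - (x2 < x1)
--     dy = (y1 < y2) - (y2 < y1)
--     if dx * (y2 - y1) != dy * (x2 - x1):
--         return []
--     cells = []
--     x, y = x1 + dx, y1 + dy
--     while (x, y) != (x2, y2):
--         cells.append(y * 8 + x)
--         x += dx
--         y += dy
--     return cells
-- ===== Notes on version B (the rewrite author's own statement) =====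
-- stated objective: alternative
-- what changed: B replaces the precomputed step count n and index arithmetic pos1+i*dp by a walk in coordinate space: it advances a moving (x,y) pair by (dx,dy) and stops on reaching the target cell, re-encoding each visited cell as y*8+x.
import Mathlib
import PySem

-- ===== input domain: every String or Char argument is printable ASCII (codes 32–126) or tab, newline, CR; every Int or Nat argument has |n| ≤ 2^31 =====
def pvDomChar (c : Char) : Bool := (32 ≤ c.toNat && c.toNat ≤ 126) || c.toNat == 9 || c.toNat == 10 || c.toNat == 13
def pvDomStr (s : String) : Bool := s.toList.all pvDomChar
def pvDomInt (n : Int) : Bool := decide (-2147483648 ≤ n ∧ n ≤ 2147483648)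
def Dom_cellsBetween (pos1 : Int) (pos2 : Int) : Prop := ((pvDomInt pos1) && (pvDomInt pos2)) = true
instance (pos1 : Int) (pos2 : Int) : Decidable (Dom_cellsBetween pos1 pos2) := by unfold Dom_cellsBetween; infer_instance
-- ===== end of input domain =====

-- B walks in coordinate space to the target instead of precomputing the step count; alternative decomposition, same cost.

-- ===== PORT A =====
def xyA (pos1 pos2 : Int) : Int × Int × Int × Int :=
  (PySem.Int.mod pos1 8, PySem.Int.floordiv pos1 8, PySem.Int.mod pos2 8, PySem.Int.floordiv pos2 8)

def signA (a : Int) : Int := if a < 0 then -1 else if a ≠ 0 then 1 else 0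

def cellsBetween (pos1 : Int) (pos2 : Int) : List Int :=
  match xyA pos1 pos2 with
  | (x1, y1, x2, y2) =>
    let dx := signA (x2 - x1)
    let dy := signA (y2 - y1)
    if dx * (y2 - y1) ≠ dy * (x2 - x1) then []
    else
      let n := max (dx * (x2 - x1)) (dy * (y2 - y1))
      let dp := dx + dy * 8
      (PySem.List.pyRange 1 n 1).map (fun i => pos1 + i * dp)

-- ===== PORT B =====
-- the while loop of Source B, totalised by a fuel argument (large enough whenever the guard passed)
def walkB (x2 y2 dx dy : Int) : Nat → Int → Int → List Int
  | 0, _, _ => []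
  | fuel + 1, x, y =>
    if (x, y) = (x2, y2) then []
    else (y * 8 + x) :: walkB x2 y2 dx dy fuel (x + dx) (y + dy)

def cellsBetween_alt (pos1 : Int) (pos2 : Int) : List Int :=
  let x1 := PySem.Int.mod pos1 8
  let y1 := PySem.Int.floordiv pos1 8
  let x2 := PySem.Int.mod pos2 8
  let y2 := PySem.Int.floordiv pos2 8
  let dx := (if x1 < x2 then (1 : Int) else 0) - (if x2 < x1 then 1 else 0)
  let dy := (if y1 < y2 then (1 : Int) else 0) - (if y2 < y1 then 1 else 0)
  if dx * (y2 - y1) ≠ dy * (x2 - x1) then []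
  else walkB x2 y2 dx dy ((x2 - x1).natAbs + (y2 - y1).natAbs) (x1 + dx) (y1 + dy)

-- ===== PRECONDITION & SPEC =====
def Spec_cellsBetween (pos1 : Int) (pos2 : Int) (out : List Int) : Prop := out = cellsBetween_alt pos1 pos2
instance (pos1 : Int) (pos2 : Int) (out : List Int) : Decidable (Spec_cellsBetween pos1 pos2 out) := by unfold Spec_cellsBetween; infer_instance

-- ===== CLAIM (what is proved, stated in full; the proofs are below) =====
def Claim_equal_cellsBetween : Prop := ∀ (pos1 : Int) (pos2 : Int), Dom_cellsBetween pos1 pos2 → Spec_cellsBetween pos1 pos2 (cellsBetween pos1 pos2)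

-- ===== LEMMAS AND PROOFS =====

-- the descending list of cells emitted by the walk, indexed by remaining distance
def spine (x2 y2 dx dy : Int) : Nat → List Int
  | 0 => []
  | m + 1 => ((y2 - (m + 1) * dy) * 8 + (x2 - (m + 1) * dx)) :: spine x2 y2 dx dy m

lemma sign_via_lt (a b : Int) :
    (if a < b then (1 : Int) else 0) - (if b < a then 1 else 0) = signA (b - a) := by
  unfold signA; split_ifs <;> omega

lemma walk_eq_spine (x2 y2 dx dy : Int) (hd : dx ≠ 0 ∨ dy ≠ 0) :
    ∀ (m fuel : Nat), m ≤ fuel →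
      walkB x2 y2 dx dy fuel (x2 - m * dx) (y2 - m * dy) = spine x2 y2 dx dy m := by
  intro m
  induction m with
  | zero =>
    intro fuel _
    cases fuel <;> simp [walkB, spine]
  | succ m ih =>
    intro fuel hf
    obtain ⟨f, rfl⟩ : ∃ f, fuel = f + 1 := ⟨fuel - 1, by omega⟩
    have hne : (x2 - (↑(m + 1) : Int) * dx, y2 - (↑(m + 1) : Int) * dy) ≠ (x2, y2) := by
      intro h
      have h1 := congrArg Prod.fst h
      have h2 := congrArg Prod.snd h
      simp at h1 h2
      rcases hd with h | h
      · rcases h1 with h1 | h1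
        · omega
        · exact h h1
      · rcases h2 with h2 | h2
        · omega
        · exact h h2
    rw [walkB, if_neg hne]
    have hx : x2 - (↑(m + 1) : Int) * dx + dx = x2 - m * dx := by push_cast; ring
    have hy : y2 - (↑(m + 1) : Int) * dy + dy = y2 - m * dy := by push_cast; ring
    rw [hx, hy, ih f (by omega)]
    simp only [spine]
    congr 2

lemma spine_eq_range (x1 y1 dx dy n : Int) :
    ∀ m : Nat,
      spine (x1 + n * dx) (y1 + n * dy) dx dy m
        = (PySem.List.pyRange (n - m) n 1).map (fun i => (y1 * 8 + x1) + i * (dx + dy * 8)) := by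
  intro m
  induction m with
  | zero => simp [spine, PySem.List.pyRange_one_eq_nil (by omega : n ≤ n)]
  | succ m ih =>
    have hlt : n - (↑(m + 1) : Int) < n := by push_cast; omega
    rw [spine, ih, PySem.List.pyRange_one_cons hlt]
    have : n - (↑(m + 1) : Int) + 1 = n - m := by push_cast; ring
    rw [this, List.map_cons]
    congr 1
    push_cast; ring

lemma key_lemma (A B n dx dy : Int) (hdx : dx = signA A) (hdy : dy = signA B)
    (hn : n = max (dx * A) (dy * B)) (hg : dx * B = dy * A) :
    A = n * dx ∧ B = n * dy ∧ 0 ≤ n ∧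
      (1 ≤ n → ((n - 1).toNat ≤ A.natAbs + B.natAbs ∧ (dx ≠ 0 ∨ dy ≠ 0))) ∧
      (n = 0 → A.natAbs + B.natAbs = 0) := by
  subst hdx hdy hn
  unfold signA at *
  rcases max_cases ((if A < 0 then (-1 : Int) else if A ≠ 0 then 1 else 0) * A)
      ((if B < 0 then (-1 : Int) else if B ≠ 0 then 1 else 0) * B) with ⟨h1, h2⟩ | ⟨h1, h2⟩ <;>
    split_ifs at * <;> omega

-- ===== VERDICT (by name: the statement is the Claim_ definition above) =====
theorem cellsBetween_spec : Claim_equal_cellsBetween := by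
  intro pos1 pos2 _
  simp only [Spec_cellsBetween, cellsBetween, cellsBetween_alt, xyA]
  rw [sign_via_lt, sign_via_lt]
  set x1 := PySem.Int.mod pos1 8 with hx1
  set y1 := PySem.Int.floordiv pos1 8 with hy1
  set x2 := PySem.Int.mod pos2 8
  set y2 := PySem.Int.floordiv pos2 8
  set dx := signA (x2 - x1) with hdx
  set dy := signA (y2 - y1) with hdy
  by_cases hg : dx * (y2 - y1) ≠ dy * (x2 - x1)
  · simp [hg]
  · push_neg at hg
    simp only [hg, ne_eq, not_true_eq_false, if_false]
    set n := max (dx * (x2 - x1)) (dy * (y2 - y1)) with hn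
    have hpos : y1 * 8 + x1 = pos1 := by
      have := PySem.Int.floordiv_mul_add_mod pos1 8
      rw [← hx1, ← hy1] at this; linarith
    obtain ⟨hkx, hky, hn0, hbig, hzero⟩ :=
      key_lemma (x2 - x1) (y2 - y1) n dx dy hdx hdy hn hg
    rcases eq_or_lt_of_le hn0 with hn' | hn'
    · -- n = 0 : both sides are []
      rw [hzero hn'.symm, PySem.List.pyRange_one_eq_nil (by omega)]
      simp [walkB]
    · -- 1 ≤ n
      obtain ⟨hfuel, hd⟩ := hbig hn'
      have hmx : x1 + dx = x2 - ((n - 1).toNat : Int) * dx := by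
        rw [Int.toNat_of_nonneg (by omega)]; linarith [hkx]
      have hmy : y1 + dy = y2 - ((n - 1).toNat : Int) * dy := by
        rw [Int.toNat_of_nonneg (by omega)]; linarith [hky]
      rw [hmx, hmy, walk_eq_spine x2 y2 dx dy hd _ _ hfuel]
      have hx2 : x2 = x1 + n * dx := by linarith
      have hy2 : y2 = y1 + n * dy := by linarith
      rw [hx2, hy2, spine_eq_range]
      have h1 : n - ((n - 1).toNat : Int) = 1 := by
        rw [Int.toNat_of_nonneg (by omega)]; ring
      rw [h1, hpos]
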